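-- pv_equiv track=rewrite | github.com/ssupecial/ps | programmers/lv2/괄호.py | check
-- ===== SOURCE A (Python) =====
-- def check(s):
--     type_a = 0
--     type_b = 0
--     type_c = 0
--
--     for w in s:
--         if w == "(":
--             type_a += 1
--         elif w == ")":
--             if type_a == 0:
--                 return False
--             else:
--                 type_a -= 1
--         elif w == "[":
--             type_b += 1
--         elif w == "]":
--             if type_b == 0:
--                 return False
--             else:
--                 type_b -= 1
--         elif w == "{":
--             type_c += 1
--         elif w == "}":
--             if type_c == 0:
--                 return False
--             else:
--                 type_c -= 1
--     if (type_a + type_b + type_c) != 0: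
--         return False
--     else:
--         return True
-- ===== SOURCE B (Python) =====
-- def _balanced(s, open_ch, close_ch):
--     count = 0
--     for w in s:
--         if w == open_ch:
--             count += 1
--         elif w == close_ch:
--             if count == 0:
--                 return False
--             count -= 1
--     return count == 0
--
--
-- def check(s):
--     return _balanced(s, "(", ")") and _balanced(s, "[", "]") and _balanced(s, "{", "}")
-- ===== Notes on version B (the rewrite author's own statement) =====
-- stated objective: simpler
-- what changed: Replaces the single interleaved three-counter pass with a small helper that validates one bracket type per full scan, called three times and combined with short-circuit and.
import Mathlib
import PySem

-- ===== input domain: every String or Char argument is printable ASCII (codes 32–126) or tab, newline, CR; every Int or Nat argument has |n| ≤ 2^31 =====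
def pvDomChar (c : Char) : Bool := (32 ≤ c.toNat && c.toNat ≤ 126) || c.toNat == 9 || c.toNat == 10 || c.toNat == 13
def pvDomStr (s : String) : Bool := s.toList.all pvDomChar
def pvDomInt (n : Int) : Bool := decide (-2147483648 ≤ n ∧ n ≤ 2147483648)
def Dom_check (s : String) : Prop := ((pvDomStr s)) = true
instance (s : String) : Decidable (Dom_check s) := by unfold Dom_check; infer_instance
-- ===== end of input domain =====

-- B replaces A's single interleaved three-counter pass by one per-bracket-type scan run three times; same O(n) cost (objective: simpler).

-- ===== PORT A =====
-- A's loop over the string with the three counters; early `return False` becomes returning `false` directly.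
def checkLoop : List Char → Int → Int → Int → Bool
  | [], a, b, c => if a + b + c ≠ 0 then false else true
  | w :: ws, a, b, c =>
    if w = '(' then checkLoop ws (a + 1) b c
    else if w = ')' then (if a = 0 then false else checkLoop ws (a - 1) b c)
    else if w = '[' then checkLoop ws a (b + 1) c
    else if w = ']' then (if b = 0 then false else checkLoop ws a (b - 1) c)
    else if w = '{' then checkLoop ws a b (c + 1)
    else if w = '}' then (if c = 0 then false else checkLoop ws a b (c - 1))
    else checkLoop ws a b c

def check (s : String) : Bool := checkLoop s.toList 0 0 0

-- ===== PORT B =====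
-- B's helper `_balanced`: validate one bracket pair over the whole string.
def balancedLoop (o cl : Char) : List Char → Int → Bool
  | [], n => decide (n = 0)
  | w :: ws, n =>
    if w = o then balancedLoop o cl ws (n + 1)
    else if w = cl then (if n = 0 then false else balancedLoop o cl ws (n - 1))
    else balancedLoop o cl ws n

def check_alt (s : String) : Bool :=
  balancedLoop '(' ')' s.toList 0 && balancedLoop '[' ']' s.toList 0 && balancedLoop '{' '}' s.toList 0

-- ===== PRECONDITION & SPEC =====
def Spec_check (s : String) (out : Bool) : Prop := out = check_alt s
instance (s : String) (out : Bool) : Decidable (Spec_check s out) := by unfold Spec_check; infer_instance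

-- ===== CLAIM (what is proved, stated in full; the proofs are below) =====
def Claim_equal_check : Prop := ∀ (s : String), Dom_check s → Spec_check s (check s)

-- ===== LEMMAS AND PROOFS =====

-- A's interleaved loop splits into the three independent per-type scans, given nonnegative counters.
theorem checkLoop_eq_balanced (l : List Char) :
    ∀ a b c : Int, 0 ≤ a → 0 ≤ b → 0 ≤ c →
      checkLoop l a b c =
        (balancedLoop '(' ')' l a && balancedLoop '[' ']' l b && balancedLoop '{' '}' l c) := by
  induction l with
  | nil =>
    intro a b c ha hb hc
    simp only [checkLoop, balancedLoop]
    by_cases h : a + b + c = 0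
    · have ha0 : a = 0 := by omega
      have hb0 : b = 0 := by omega
      have hc0 : c = 0 := by omega
      simp [ha0, hb0, hc0]
    · simp [h]
      omega
  | cons w ws ih =>
    intro a b c ha hb hc
    simp only [checkLoop, balancedLoop]
    by_cases h1 : w = '('
    · simp [h1, ih (a+1) b c (by omega) hb hc]
    by_cases h2 : w = ')'
    · simp [h2]
      by_cases h : a = 0
      · simp [h]
      · simp [h, ih (a-1) b c (by omega) hb hc]
    by_cases h3 : w = '['
    · simp [h3, ih a (b+1) c ha (by omega) hc]
    by_cases h4 : w = ']'
    · simp [h4]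
      by_cases h : b = 0
      · simp [h]
      · simp [h, ih a (b-1) c ha (by omega) hc]
    by_cases h5 : w = '{'
    · simp [h5, ih a b (c+1) ha hb (by omega)]
    by_cases h6 : w = '}'
    · simp [h6]
      by_cases h : c = 0
      · simp [h]
      · simp [h, ih a b (c-1) ha hb (by omega)]
    simp [h1, h2, h3, h4, h5, h6, ih a b c ha hb hc]

-- ===== VERDICT (by name: the statement is the Claim_ definition above) =====
theorem check_spec : Claim_equal_check := by
  intro s _
  unfold Spec_check check check_alt
  exact checkLoop_eq_balanced s.toList 0 0 0 le_rfl le_rfl le_rfl
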